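-- pv_equiv track=rewrite | github.com/kanujoa/coding_test_practice | python_programmers_school/level 1/숫자 짝궁.py | solution
-- ===== SOURCE A (Python) =====
-- def solution(X, Y):
--     answer = ''
--     # answer에 들어갈 수를 구하는 과정
--     for i in set(X):     # i는 X의 구성 요소 (set을 썼으므로 중복 X)
--         if X.count(i) >= Y.count(i):     # X에서 i를 센 값이 Y에서 i를 센 값보다 크거나 같다면
--             answer += i * Y.count(i)     # Y에서 i를 센 값이 i의 개수가 되고, 그 개수만큼 answer에 i를 더한다. (문자열) (겹치는 만큼만 짝궁이 되므로!)
--         else:     # Y에서 i를 센 값이 더 많을 경우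
--             answer += i * X.count(i)     # X에서 i를 센 값이 i의 개수가 되고, 그 개수만큼 answer에 i를 더한다. (문자열) (겹치는 만큼만 짝궁이 되므로!)
--     # answer의 값에 따라 반환할 값을 구하는 과정
--     if answer == '':     # answer가 빈 값인 경우
--         return '-1'     # 짝궁이 없는 경우이므로 -1 반환
--     elif set(answer) == {'0'}:     # answer의 구성 요소가 '0' 밖에 없는 경우
--         return '0'     # '0' 반환
--     else:     # 나머지 보통의 경우
--         return ''.join(sorted(answer, reverse=True))     # 최대의 수를 구해야 하므로 answer의 구성 요소를 내림차순 정렬 뒤 문자열로 만드는 과정을 거쳤다.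
-- ===== SOURCE B (Python) =====
-- def solution(X, Y):
--     # Sort both strings descending and take the common multiset with one two-pointer merge.
--     xs = sorted(X, reverse=True)
--     ys = sorted(Y, reverse=True)
--     i = j = 0
--     ans = []
--     while i < len(xs) and j < len(ys):
--         if xs[i] == ys[j]:
--             ans.append(xs[i])
--             i += 1
--             j += 1
--         elif xs[i] > ys[j]:
--             i += 1
--         else:
--             j += 1
--     if not ans:
--         return '-1'
--     if ans[0] == '0' == ans[-1]:   # descending: all characters are '0' iff max and min are '0'
--         return '0'
--     return ''.join(ans)            # already descending
-- ===== Notes on version B (the rewrite author's own statement) =====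
-- stated objective: alternative
-- what changed: A counts each distinct character of X in both strings with repeated .count passes and sorts the collected answer at the end; B sorts both strings descending once and extracts the common multiset, already in descending order, with a single two-pointer merge, testing the all-zeros case by looking only at the first and last character.
import Mathlib
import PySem

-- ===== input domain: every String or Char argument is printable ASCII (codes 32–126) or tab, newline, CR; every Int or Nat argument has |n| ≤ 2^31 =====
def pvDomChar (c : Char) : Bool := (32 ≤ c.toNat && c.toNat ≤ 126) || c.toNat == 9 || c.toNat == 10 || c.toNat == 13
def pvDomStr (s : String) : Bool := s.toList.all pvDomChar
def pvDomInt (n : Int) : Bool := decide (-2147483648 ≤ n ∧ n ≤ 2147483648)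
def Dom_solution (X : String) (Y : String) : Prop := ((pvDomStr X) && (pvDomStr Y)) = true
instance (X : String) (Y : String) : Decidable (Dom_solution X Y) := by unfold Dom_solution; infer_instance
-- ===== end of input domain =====

-- B replaces A's per-distinct-character counting pass by sorting both strings descending and a single
-- two-pointer merge that produces the common multiset already in descending order (alternative algorithm).


-- ===== PORT A =====
-- for i in set(X): answer += i * (min multiplicity), as a fold over set(X) (final result is order-independent)
def ansA (xs ys : List Char) : List Char :=
  (PySem.Set.ofList xs).foldl (fun acc i =>
    if PySem.List.count xs i ≥ PySem.List.count ys i then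
      acc ++ List.replicate (PySem.List.count ys i) i
    else
      acc ++ List.replicate (PySem.List.count xs i) i) []

def solution (X : String) (Y : String) : String :=
  if ansA X.toList Y.toList = [] then "-1"
  else if PySem.Set.equal (PySem.Set.ofList (ansA X.toList Y.toList)) (PySem.Set.ofList ['0']) then "0"
  else String.ofList (PySem.List.sorted (ansA X.toList Y.toList) (fun c => c) true)

-- ===== PORT B =====
-- the two-pointer while-loop of Source B, as recursion on the two (descending) lists
def mergeDesc : List Char → List Char → List Char
  | [], _ => []
  | _ :: _, [] => []
  | x :: xs, y :: ys =>
    if x = y then x :: mergeDesc xs ys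
    else if x > y then mergeDesc xs (y :: ys)
    else mergeDesc (x :: xs) ys
termination_by a b => a.length + b.length

def solution_alt (X : String) (Y : String) : String :=
  match mergeDesc (PySem.List.sorted X.toList (fun c => c) true)
      (PySem.List.sorted Y.toList (fun c => c) true) with
  | [] => "-1"
  | c :: rest =>
    if c = '0' ∧ rest.getLastD c = '0' then "0"
    else String.ofList (c :: rest)

-- ===== PRECONDITION & SPEC =====
def Spec_solution (X : String) (Y : String) (out : String) : Prop := out = solution_alt X Y
instance (X : String) (Y : String) (out : String) : Decidable (Spec_solution X Y out) := by unfold Spec_solution; infer_instance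

-- ===== CLAIM (what is proved, stated in full; the proofs are below) =====
def Claim_equal_solution : Prop := ∀ (X : String) (Y : String), Dom_solution X Y → Spec_solution X Y (solution X Y)

-- ===== LEMMAS AND PROOFS =====

-- A's answer is the concatenation, over the distinct characters of X, of min-multiplicity blocks
theorem ansA_eq_flatMap (xs ys : List Char) :
    ansA xs ys = (PySem.Set.ofList xs).flatMap
      (fun i => List.replicate (min (List.count i xs) (List.count i ys)) i) := by
  unfold ansA
  rw [List.foldl_ext _ (fun acc i =>
      acc ++ List.replicate (min (List.count i xs) (List.count i ys)) i) _
      (by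
        intro acc i _
        simp only [PySem.List.count_eq]
        split_ifs with h
        · rw [Nat.min_eq_right h]
        · rw [Nat.min_eq_left (Nat.le_of_not_le h)])]
  rw [PySem.List.foldl_append_eq_flatMap]
  simp

theorem count_flatMap_rep (l : List Char) (f : Char → Nat) (hnd : l.Nodup) (c : Char) :
    List.count c (l.flatMap (fun i => List.replicate (f i) i)) = if c ∈ l then f c else 0 := by
  induction l with
  | nil => simp
  | cons a l ih =>
    simp only [List.flatMap_cons, List.count_append, List.count_replicate]
    rw [ih hnd.of_cons]
    have ha : a ∉ l := (List.nodup_cons.mp hnd).1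
    by_cases hca : a = c
    · subst hca
      simp [ha]
    · simp only [beq_iff_eq, hca, if_false, List.mem_cons]
      by_cases hcl : c ∈ l <;> simp [hcl, Ne.symm hca]

theorem count_ansA (xs ys : List Char) (c : Char) :
    List.count c (ansA xs ys) = min (List.count c xs) (List.count c ys) := by
  rw [ansA_eq_flatMap, count_flatMap_rep _ _ (PySem.Set.nodup_ofList xs)]
  by_cases h : c ∈ xs
  · simp [PySem.Set.mem_ofList, h]
  · simp [PySem.Set.mem_ofList, h, List.count_eq_zero_of_not_mem h]

-- every element of a descending-sorted cons list is ≤ the head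
theorem desc_head_max {y : Char} {ys : List Char} (h : (y :: ys).Pairwise (fun a b => b ≤ a)) :
    ∀ z ∈ y :: ys, z ≤ y := by
  intro z hz
  rcases List.mem_cons.mp hz with rfl | hz
  · exact le_refl z
  · exact (List.pairwise_cons.mp h).1 z hz

theorem getLastD_mem (l : List Char) (a : Char) (h : l ≠ []) : l.getLastD a ∈ l := by
  rw [List.getLastD_eq_getLast?, List.getLast?_eq_some_getLast h]
  exact List.getLast_mem h

theorem count_mergeDesc (xs ys : List Char)
    (hx : xs.Pairwise (fun a b => b ≤ a)) (hy : ys.Pairwise (fun a b => b ≤ a)) (c : Char) :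
    List.count c (mergeDesc xs ys) = min (List.count c xs) (List.count c ys) := by
  induction xs, ys using mergeDesc.induct with
  | case1 ys => simp [mergeDesc]
  | case2 x xs => simp [mergeDesc]
  | case3 xs y ys ih =>
    have h := ih (List.pairwise_cons.mp hx).2 (List.pairwise_cons.mp hy).2
    simp only [mergeDesc, if_true, List.count_cons, h]
    by_cases hcx : y = c <;> simp [hcx]
  | case4 x xs y ys hne hgt ih =>
    have h := ih (List.pairwise_cons.mp hx).2 hy
    simp only [mergeDesc, if_neg hne, if_pos hgt, h, List.count_cons]
    by_cases hcx : x = c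
    · subst hcx
      have hnm : x ∉ y :: ys := fun hm => absurd (desc_head_max hy x hm) (not_le.mpr hgt)
      have h1 : List.count x ys = 0 :=
        List.count_eq_zero_of_not_mem (fun hm => hnm (List.mem_cons_of_mem _ hm))
      have h2 : y ≠ x := fun hm => hnm (hm ▸ List.mem_cons_self)
      simp [h1, h2]
    · simp [hcx]
  | case5 x xs y ys hne hngt ih =>
    have h := ih hx (List.pairwise_cons.mp hy).2
    simp only [mergeDesc, if_neg hne, if_neg hngt, h, List.count_cons]
    by_cases hcy : y = c
    · subst hcy
      have hlt : x < y := lt_of_le_of_ne (not_lt.mp hngt) hne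
      have hnm : y ∉ x :: xs := fun hm => absurd (desc_head_max hx y hm) (not_le.mpr hlt)
      have h1 : List.count y xs = 0 :=
        List.count_eq_zero_of_not_mem (fun hm => hnm (List.mem_cons_of_mem _ hm))
      have h2 : x ≠ y := fun hm => hnm (hm ▸ List.mem_cons_self)
      simp [h1, h2]
    · simp [hcy]

theorem mergeDesc_sublist (xs ys : List Char) : (mergeDesc xs ys).Sublist xs := by
  induction xs, ys using mergeDesc.induct with
  | case1 ys => simp [mergeDesc]
  | case2 x xs => simp [mergeDesc]
  | case3 xs y ys ih => simpa [mergeDesc] using ih.cons₂ y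
  | case4 x xs y ys hne hgt ih =>
    simp only [mergeDesc, if_neg hne, if_pos hgt]
    exact ih.cons x
  | case5 x xs y ys hne hngt ih =>
    simpa only [mergeDesc, if_neg hne, if_neg hngt] using ih

theorem mergeDesc_pairwise (xs ys : List Char) (hx : xs.Pairwise (fun a b => b ≤ a)) :
    (mergeDesc xs ys).Pairwise (fun a b => b ≤ a) :=
  List.Pairwise.sublist (mergeDesc_sublist xs ys) hx

-- a nonempty descending list whose head and last are '0' consists of '0' only
theorem desc_all_zero : ∀ (c : Char) (rest : List Char),
    (c :: rest).Pairwise (fun a b => b ≤ a) → c = '0' → rest.getLastD c = '0' →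
    ∀ x ∈ c :: rest, x = '0' := by
  intro c rest
  induction rest generalizing c with
  | nil =>
    intro _ h0 _ x hx
    simp at hx
    simpa [hx] using h0
  | cons b rest ih =>
    intro hp h0 hl x hx
    have hb0 : b = '0' := by
      have hble : b ≤ c := (List.pairwise_cons.mp hp).1 b (List.mem_cons_self)
      cases rest with
      | nil => simpa using hl
      | cons d rest' =>
        have hlast : (d :: rest').getLastD b ∈ d :: rest' := getLastD_mem _ _ (by simp)
        have := (List.pairwise_cons.mp (List.pairwise_cons.mp hp).2).1 _ hlast
        rw [List.getLastD_cons] at hl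
        rw [hl] at this
        exact le_antisymm (h0 ▸ hble) this
    rcases List.mem_cons.mp hx with rfl | hx'
    · exact h0
    · exact ih b ((List.pairwise_cons.mp hp).2) hb0 (by rw [List.getLastD_cons] at hl; exact hb0 ▸ hl) x hx'

-- ===== VERDICT (by name: the statement is the Claim_ definition above) =====
theorem solution_spec : Claim_equal_solution := by
  intro X Y _
  unfold Spec_solution solution solution_alt
  have hpx : (PySem.List.sorted X.toList (fun c => c) true).Pairwise (fun a b => b ≤ a) :=
    PySem.List.sorted_pairwise_rev X.toList (fun c => c)
  have hperm : (ansA X.toList Y.toList).Perm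
      (mergeDesc (PySem.List.sorted X.toList (fun c => c) true)
        (PySem.List.sorted Y.toList (fun c => c) true)) := by
    rw [List.perm_iff_count]
    intro c
    rw [count_ansA, count_mergeDesc _ _ hpx (PySem.List.sorted_pairwise_rev Y.toList (fun c => c)),
      ((PySem.List.sorted_perm X.toList (fun c => c) true).count_eq c),
      ((PySem.List.sorted_perm Y.toList (fun c => c) true).count_eq c)]
  have hMp : (mergeDesc (PySem.List.sorted X.toList (fun c => c) true)
      (PySem.List.sorted Y.toList (fun c => c) true)).Pairwise (fun a b => b ≤ a) :=
    mergeDesc_pairwise _ _ hpx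
  cases hcr : mergeDesc (PySem.List.sorted X.toList (fun c => c) true)
      (PySem.List.sorted Y.toList (fun c => c) true) with
  | nil =>
    have hnil : ansA X.toList Y.toList = [] := (hcr ▸ hperm).eq_nil
    rw [if_pos hnil]
  | cons c rest =>
    rw [hcr] at hperm hMp
    have hnil : ansA X.toList Y.toList ≠ [] := by
      intro h
      rw [h] at hperm
      exact List.cons_ne_nil c rest hperm.symm.eq_nil
    rw [if_neg hnil]
    show _ = if c = '0' ∧ rest.getLastD c = '0' then "0" else String.ofList (c :: rest)
    have hmemiff : ∀ x, x ∈ ansA X.toList Y.toList ↔ x ∈ c :: rest := fun x => hperm.mem_iff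
    -- the two '0'-tests agree
    have htest : (PySem.Set.equal (PySem.Set.ofList (ansA X.toList Y.toList))
        (PySem.Set.ofList ['0']) = true) ↔ (c = '0' ∧ rest.getLastD c = '0') := by
      rw [PySem.Set.equal_iff]
      constructor
      · intro h
        have hall : ∀ x ∈ c :: rest, x = '0' := by
          intro x hx
          have hx' : x ∈ ansA X.toList Y.toList := (hmemiff x).mpr hx
          have := (h x).mp (by rwa [PySem.Set.mem_ofList])
          rw [PySem.Set.mem_ofList] at this
          simpa using this
        refine ⟨hall c List.mem_cons_self, ?_⟩
        cases rest with
        | nil => simpa using hall c List.mem_cons_self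
        | cons d rest' =>
          exact hall _ (List.mem_cons_of_mem _ (getLastD_mem (d :: rest') c (by simp)))
      · rintro ⟨h0, hl⟩ x
        have hall := desc_all_zero c rest hMp h0 hl
        rw [PySem.Set.mem_ofList, PySem.Set.mem_ofList, hmemiff]
        constructor
        · intro hx
          simp [hall x hx]
        · intro hx
          simp at hx
          subst hx
          exact h0 ▸ List.mem_cons_self
    by_cases hz : c = '0' ∧ rest.getLastD c = '0'
    · rw [if_pos (htest.mpr hz), if_pos hz]
    · rw [if_neg (fun h => hz (htest.mp h)), if_neg hz]
      -- sorted(answer, reverse=True) = the merge: both descending rearrangements of the same multiset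
      have hsorted : PySem.List.sorted (ansA X.toList Y.toList) (fun c => c) true = c :: rest := by
        apply List.Perm.eq_of_pairwise (le := fun a b => b ≤ a)
          (fun a b _ _ h1 h2 => le_antisymm h2 h1)
          (PySem.List.sorted_pairwise_rev (ansA X.toList Y.toList) (fun c => c)) hMp
        exact (PySem.List.sorted_perm (ansA X.toList Y.toList) (fun c => c) true).trans hperm
      rw [hsorted]
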